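-- pv_equiv track=rewrite | github.com/Anders-E/Advent-of-Code-2018 | day_11/day_11_1.py | find_largest_power_coords
-- ===== SOURCE A (Python) =====
-- def square_level(grid, x, y):
--     return sum(
--         [sum(value) for value in [col[y:y+3] for col in grid[x:x+3]]]
--     )
--
-- def find_largest_power_coords(grid):
--     max_level = -45
--     max_x = -1
--     max_y = -1
--     for x in range(298):
--         for y in range(298):
--             if max_level < square_level(grid, x, y):
--                 max_level = square_level(grid, x, y)
--                 max_x = x
--                 max_y = y
--     return max_x, max_y
-- ===== SOURCE B (Python) =====
-- def _window_sums(row):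
--     # prefix sums of the row, then each 3-wide window sum as a difference
--     acc = 0
--     p = [0]
--     for v in row:
--         acc += v
--         p.append(acc)
--     n = len(row)
--     return [p[min(y + 3, n)] - p[min(y, n)] for y in range(298)]
--
--
-- def find_largest_power_coords(grid):
--     windows = [_window_sums(row) for row in grid]
--     best, bx, by = -45, -1, -1
--     for x in range(298):
--         trio = windows[x:x + 3]
--         for y in range(298):
--             s = 0
--             for w in trio:
--                 s += w[y]
--             if s > best:
--                 best, bx, by = s, x, y
--     return bx, by
-- ===== Notes on version B (the rewrite author's own statement) =====
-- stated objective: faster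
-- what changed: Replaces per-square slicing-and-summing with per-row prefix sums: each row's 298 three-wide window sums are tabulated once, so every 3x3 square is just three table lookups instead of building and summing sliced sublists (twice on improvement).
import Mathlib
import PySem

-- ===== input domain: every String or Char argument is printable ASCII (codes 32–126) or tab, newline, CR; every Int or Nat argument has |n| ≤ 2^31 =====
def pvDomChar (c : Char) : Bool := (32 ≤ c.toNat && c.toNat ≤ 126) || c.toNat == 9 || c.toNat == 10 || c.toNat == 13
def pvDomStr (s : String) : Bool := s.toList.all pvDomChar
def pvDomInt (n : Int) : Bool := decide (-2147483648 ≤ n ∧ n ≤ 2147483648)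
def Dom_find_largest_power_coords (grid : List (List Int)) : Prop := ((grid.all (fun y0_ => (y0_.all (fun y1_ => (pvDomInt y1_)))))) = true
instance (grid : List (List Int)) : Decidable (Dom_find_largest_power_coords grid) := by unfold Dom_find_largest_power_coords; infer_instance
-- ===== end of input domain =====

-- B replaces A's per-square slicing/summing by per-row prefix-sum window tables (faster by a constant factor).

-- ===== PORT A =====
def square_level (grid : List (List Int)) (x y : Int) : Int :=
  (((PySem.List.slice grid (some x) (some (x + 3))).map
      (fun col => PySem.List.slice col (some y) (some (y + 3)))).map
    (fun value => value.sum)).sum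

def find_largest_power_coords (grid : List (List Int)) : Int × Int :=
  let st := (PySem.List.pyRange 0 298 1).foldl (fun st x =>
    (PySem.List.pyRange 0 298 1).foldl (fun st y =>
      if st.1 < square_level grid x y then (square_level grid x y, x, y) else st) st)
    (-45, -1, -1)
  (st.2.1, st.2.2)

-- ===== PORT B =====
-- running prefix sums of a row ('p = [0]; for v in row: acc += v; p.append(acc)')
def pbuild : List Int → Int → List Int
  | [], _ => []
  | v :: r, acc => (acc + v) :: pbuild r (acc + v)

-- p[min(y+3,n)] - p[min(y,n)] for y in range(298); indices are always in range, so .getD 0 is exact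
def window_sums (row : List Int) : List Int :=
  let p : List Int := 0 :: pbuild row 0
  let n : Int := (row.length : Int)
  (PySem.List.pyRange 0 298 1).map (fun y =>
    (PySem.List.pyGet? p (min (y + 3) n)).getD 0 - (PySem.List.pyGet? p (min y n)).getD 0)

def find_largest_power_coords_alt (grid : List (List Int)) : Int × Int :=
  let windows := grid.map window_sums
  let st := (PySem.List.pyRange 0 298 1).foldl (fun st x =>
    let trio := PySem.List.slice windows (some x) (some (x + 3))
    (PySem.List.pyRange 0 298 1).foldl (fun st y =>
      let s := trio.foldl (fun s w => s + (PySem.List.pyGet? w y).getD 0) 0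
      if st.1 < s then (s, x, y) else st) st)
    (-45, -1, -1)
  (st.2.1, st.2.2)

-- ===== PRECONDITION & SPEC =====
def Spec_find_largest_power_coords (grid : List (List Int)) (out : Int × Int) : Prop := out = find_largest_power_coords_alt grid
instance (grid : List (List Int)) (out : Int × Int) : Decidable (Spec_find_largest_power_coords grid out) := by unfold Spec_find_largest_power_coords; infer_instance

-- ===== CLAIM (what is proved, stated in full; the proofs are below) =====
def Claim_equal_find_largest_power_coords : Prop := ∀ (grid : List (List Int)), Dom_find_largest_power_coords grid → Spec_find_largest_power_coords grid (find_largest_power_coords grid)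

-- ===== LEMMAS AND PROOFS =====

-- the prefix-sum table entry k is the sum of the first k elements
theorem pbuild_getD (row : List Int) : ∀ (acc : Int) (k : Nat), k ≤ row.length →
    (acc :: pbuild row acc).getD k 0 = acc + (row.take k).sum := by
  induction row with
  | nil =>
    intro acc k hk
    have hk0 : k = 0 := by simpa using hk
    subst hk0; simp
  | cons v r ih =>
    intro acc k hk
    cases k with
    | zero => simp
    | succ k =>
      have := ih (acc + v) k (by simpa using hk)
      simp only [pbuild, List.getD] at *
      simpa [List.take_succ_cons, add_assoc] using this

theorem pbuild_length (row : List Int) : ∀ (acc : Int), (pbuild row acc).length = row.length := by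
  induction row with
  | nil => intro acc; simp [pbuild]
  | cons v r ih => intro acc; simp [pbuild, ih]

-- sum of the slice row[k:k+3] as a difference of saturated take-sums
theorem slice_sum_eq (row : List Int) (k : Nat) :
    (PySem.List.slice row (some (k : Int)) (some ((k : Int) + 3))).sum
      = (row.take (min (k + 3) row.length)).sum - (row.take (min k row.length)).sum := by
  have h3 : ((k : Int) + 3) = ((k + 3 : Nat) : Int) := by push_cast; ring
  rw [h3, PySem.List.slice_natCast]
  have htk : row.take (min (k + 3) row.length) = row.take (k + 3) := by
    by_cases h : k + 3 ≤ row.length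
    · rw [min_eq_left h]
    · rw [min_eq_right (by omega), List.take_length, List.take_of_length_le (by omega)]
  have htk2 : row.take (min k row.length) = row.take k := by
    by_cases h : k ≤ row.length
    · rw [min_eq_left h]
    · rw [min_eq_right (by omega), List.take_length, List.take_of_length_le (by omega)]
  rw [htk, htk2]
  have hta : row.take (k + 3) = row.take k ++ (row.drop k).take 3 := List.take_add
  have hd : k + 3 - k = 3 := by omega
  rw [hta, List.sum_append, hd]
  ring

-- window_sums row, read at index y = k < 298, is the sum of row[k:k+3]
theorem window_sums_get (row : List Int) (k : Nat) (hk : k < 298) :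
    (PySem.List.pyGet? (window_sums row) (k : Int)).getD 0
      = (PySem.List.slice row (some (k : Int)) (some ((k : Int) + 3))).sum := by
  unfold window_sums
  rw [PySem.List.pyGet?_natCast]
  rw [PySem.List.pyRange_one]
  simp only [List.getElem?_map]
  have hlen : k < (List.range ((298 - 0 : Int)).toNat).length := by simpa using hk
  rw [List.getElem?_eq_getElem hlen]
  simp only [Option.map_some, Option.getD_some, List.getElem_range]
  have h1 : min ((0 : Int) + (k : Int) + 3) (row.length : Int) = ((min (k + 3) row.length : Nat) : Int) := by
    push_cast; omega
  have h2 : min ((0 : Int) + (k : Int)) (row.length : Int) = ((min k row.length : Nat) : Int) := by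
    push_cast; omega
  rw [h1, h2]
  have hget : ∀ (m : Nat), m ≤ row.length →
      (PySem.List.pyGet? (0 :: pbuild row 0) ((m : Nat) : Int)).getD 0 = (row.take m).sum := by
    intro m hm
    rw [PySem.List.pyGet?_natCast]
    have hlen2 : m < (0 :: pbuild row 0).length := by
      simp [pbuild_length row 0]; omega
    rw [List.getElem?_eq_getElem hlen2, Option.getD_some, ← List.getD_eq_getElem _ 0 hlen2]
    simpa using pbuild_getD row 0 m hm
  rw [hget _ (by omega), hget _ (by omega), slice_sum_eq row k]

-- slice commutes with map (both bounds nonneg casts)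
theorem slice_map (l : List (List Int)) (f : List Int → List Int) (a b : Nat) :
    PySem.List.slice (l.map f) (some (a : Int)) (some (b : Int))
      = (PySem.List.slice l (some (a : Int)) (some (b : Int))).map f := by
  rw [PySem.List.slice_natCast, PySem.List.slice_natCast, List.map_take, List.map_drop]

-- B's cell value equals A's square_level on the visited indices
theorem cell_eq (grid : List (List Int)) (x y : Nat) (hy : y < 298) :
    (PySem.List.slice (grid.map window_sums) (some (x : Int)) (some ((x : Int) + 3))).foldl
      (fun s w => s + (PySem.List.pyGet? w (y : Int)).getD 0) 0
      = square_level grid (x : Int) ((y : Int)) := by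
  have hx3 : ((x : Int) + 3) = ((x + 3 : Nat) : Int) := by push_cast; ring
  rw [hx3, slice_map, PySem.List.foldl_add, List.map_map]
  unfold square_level
  rw [hx3, List.map_map, zero_add]
  refine congrArg List.sum ?_
  apply List.map_congr_left
  intro col hcol
  simp only [Function.comp]
  exact window_sums_get col y hy

-- the two main double loops produce the same final state
theorem fold_eq (grid : List (List Int)) :
    (PySem.List.pyRange 0 298 1).foldl (fun st x =>
      (PySem.List.pyRange 0 298 1).foldl (fun st y =>
        if st.1 < square_level grid x y then (square_level grid x y, x, y) else st) st)
      ((-45 : Int), (-1 : Int), (-1 : Int))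
    = (PySem.List.pyRange 0 298 1).foldl (fun st x =>
      (PySem.List.pyRange 0 298 1).foldl (fun st y =>
        if st.1 < (PySem.List.slice (grid.map window_sums) (some x) (some (x + 3))).foldl
            (fun s w => s + (PySem.List.pyGet? w y).getD 0) 0
        then ((PySem.List.slice (grid.map window_sums) (some x) (some (x + 3))).foldl
            (fun s w => s + (PySem.List.pyGet? w y).getD 0) 0, x, y)
        else st) st)
      ((-45 : Int), (-1 : Int), (-1 : Int)) := by
  apply PySem.List.foldl_congr_mem
  intro st x hx
  apply PySem.List.foldl_congr_mem
  intro st' y hy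
  rw [PySem.List.mem_pyRange_one] at hx hy
  obtain ⟨xn, rfl⟩ : ∃ n : Nat, x = (n : Int) := ⟨x.toNat, by omega⟩
  obtain ⟨yn, rfl⟩ : ∃ n : Nat, y = (n : Int) := ⟨y.toNat, by omega⟩
  rw [cell_eq grid xn yn (by exact_mod_cast hy.2)]

-- ===== VERDICT (by name: the statement is the Claim_ definition above) =====
theorem find_largest_power_coords_spec : Claim_equal_find_largest_power_coords := by
  intro grid _
  unfold Spec_find_largest_power_coords find_largest_power_coords find_largest_power_coords_alt
  rw [fold_eq grid]
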